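-- pv_equiv track=rewrite | github.com/eliottcassidy2000/math | 04-computation/null_space_explanation.py | cycle_types_by_S
-- ===== SOURCE A (Python) =====
-- def cycle_types_by_S(n):
--     """Find all possible independent set cycle-type partitions grouped by S."""
--     d = n - 1
--     max_S = d
--
--     S_groups = {}
--     for S in range(2, max_S + 1, 2):
--         types = []
--         find_types(S, 3, n, [], types)
--         if types:
--             S_groups[S] = types
--     return S_groups
--
-- def find_types(S, min_k, max_verts, current, result):
--     """Find all ways to partition S into (l_i - 1) values where l_i >= 3 odd."""
--     if S == 0:
--         result.append(tuple(sorted(current, reverse=True)))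
--         return
--     if S < 2:
--         return
--     total_verts = sum(current)  # total vertices used by disjoint cycles
--     for k in range(min_k, min(S + 1, max_verts - total_verts) + 1, 2):
--         if k - 1 <= S:
--             new_verts = total_verts + k
--             if new_verts <= max_verts:
--                 find_types(S - (k - 1), k, max_verts, current + [k], result)
-- ===== SOURCE B (Python) =====
-- def cycle_types_by_S(n):
--     """Find all possible independent set cycle-type partitions grouped by S.
--
--     Explicit worklist version: instead of a recursive helper mutating a result
--     list, each S runs a DFS over frames (remaining, min_k, total_vertices,
--     parts); parts is kept ascending, so the output tuple is just its reversal
--     (no per-leaf sort) and total_vertices is threaded (no per-node sum()).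
--     Continuations are pushed in reverse k-order so leaves appear in the
--     original DFS order.
--     """
--     groups = {}
--     for S in range(2, n, 2):
--         types = []
--         stack = [(S, 3, 0, [])]
--         while stack:
--             rem, min_k, total, parts = stack.pop()
--             if rem == 0:
--                 types.append(tuple(parts[::-1]))
--             else:
--                 for k in reversed(range(min_k, min(rem + 1, n - total) + 1, 2)):
--                     stack.append((rem - (k - 1), k, total + k, parts + [k]))
--         if types:
--             groups[S] = types
--     return groups
-- ===== Notes on version B (the rewrite author's own statement) =====
-- stated objective: alternative
-- what changed: The recursive accumulator-mutating helper is replaced by an explicit worklist/stack DFS that threads the running vertex total in each frame (no per-node sum(current)) and keeps parts ascending so each leaf is emitted by reversal instead of a per-leaf sort.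
import Mathlib
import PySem

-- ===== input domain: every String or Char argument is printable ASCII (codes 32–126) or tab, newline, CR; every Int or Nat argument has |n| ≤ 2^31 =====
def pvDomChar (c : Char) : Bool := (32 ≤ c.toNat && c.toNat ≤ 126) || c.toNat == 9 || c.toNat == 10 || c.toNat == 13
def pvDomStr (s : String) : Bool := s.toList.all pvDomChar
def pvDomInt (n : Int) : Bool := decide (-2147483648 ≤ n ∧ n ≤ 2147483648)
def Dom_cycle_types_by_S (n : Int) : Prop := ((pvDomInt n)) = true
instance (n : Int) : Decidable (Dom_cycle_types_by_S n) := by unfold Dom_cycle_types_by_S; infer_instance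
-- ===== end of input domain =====

-- B is an explicit worklist/stack DFS threading the vertex total (reversal instead of per-leaf sort); objective: alternative decomposition, same enumeration cost.

-- ===== PORT A =====
-- find_types, transliterated; the Nat fuel is a totality guard only: every call
-- reachable from the entry has min_k ≥ 3, so the recursion depth is at most S/2+1
-- and the fuel S.toNat+1 supplied by the entry is never exhausted.
def findTypes : Nat → Int → Int → Int → List Int → List (List Int) → List (List Int)
  | fuel, S, min_k, max_verts, current, result =>
    if S = 0 then result ++ [PySem.List.sorted current (fun x => x) true]
    else if S < 2 then result
    else
      match fuel with
      | 0 => result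
      | f + 1 =>
        let total := current.sum
        (PySem.List.pyRange min_k (min (S + 1) (max_verts - total) + 1) 2).foldl
          (fun res k =>
            if k - 1 ≤ S then
              if total + k ≤ max_verts then
                findTypes f (S - (k - 1)) k max_verts (current ++ [k]) res
              else res
            else res) result

-- 'd = n - 1; max_S = d' inlined: the loop is over range(2, max_S + 1, 2) = range(2, (n - 1) + 1, 2)
def cycle_types_by_S (n : Int) : List (Int × List (List Int)) :=
  ((PySem.List.pyRange 2 ((n - 1) + 1) 2).foldl
    (fun (g : PySem.Dict Int (List (List Int))) S =>
      let types := findTypes (S.toNat + 1) S 3 n [] []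
      if types ≠ [] then g.insert S types else g)
    PySem.Dict.empty).items

-- ===== PORT B =====
-- Helpers for the termination measure of the worklist loop (cited by decreasing_by).
def pvFrameW (f : Int × Int × Int × List Int) : Nat := 2 ^ f.1.toNat

def pvMeas (st : List (Int × Int × Int × List Int)) : Nat := (st.map pvFrameW).sum

theorem pv_sum_two_pow_lt (l : List Nat) (E : Nat) (hd : l.Nodup) (hb : ∀ e ∈ l, e < E) :
    (l.map (fun e => 2 ^ e)).sum < 2 ^ E := by
  have hsub : l.toFinset ⊆ Finset.range E := by
    intro e he; simp only [List.mem_toFinset] at he; exact Finset.mem_range.mpr (hb e he)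
  have h1 : (l.map (fun e => 2 ^ e)).sum = ∑ e ∈ l.toFinset, 2 ^ e := by
    rw [List.sum_toFinset _ hd]
  have h2 : (∑ e ∈ l.toFinset, 2 ^ e) ≤ ∑ e ∈ Finset.range E, 2 ^ e :=
    Finset.sum_le_sum_of_subset hsub
  have h3 : ∀ m : Nat, (∑ e ∈ Finset.range m, 2 ^ e) = 2 ^ m - 1 := by
    intro m
    induction m with
    | zero => simp
    | succ m ih => rw [Finset.sum_range_succ, ih]; have := Nat.one_le_two_pow (n := m); omega
  have h4 := h3 E
  have := Nat.one_le_two_pow (n := E)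
  omega

theorem pv_nodup_pyRange_two (a b : Int) : (PySem.List.pyRange a b 2).Nodup := by
  rw [PySem.List.pyRange_of_pos a b (by norm_num : (0:Int) < 2)]
  exact List.Nodup.map (fun x y h => by omega) List.nodup_range

-- The worklist loop of B: the Lean list head is the Python stack's top (Python
-- pushes the continuations reversed and pops from the end; here they are
-- prepended in forward k-order, which is the same traversal).  The dite guard
-- '∀ k ∈ ks, 2 ≤ k' is a totality guard only: every frame B ever pushes has
-- min_k ≥ 3, so it always holds on reachable states.
def ctLoop (n : Int) (stack : List (Int × Int × Int × List Int)) (acc : List (List Int)) :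
    List (List Int) :=
  match stack with
  | [] => acc
  | (rem, min_k, total, parts) :: rest =>
    if rem = 0 then ctLoop n rest (acc ++ [parts.reverse])
    else
      let ks := PySem.List.pyRange min_k (min (rem + 1) (n - total) + 1) 2
      if h : ∀ k ∈ ks, 2 ≤ k then
        ctLoop n (ks.map (fun k => (rem - (k - 1), k, total + k, parts ++ [k])) ++ rest) acc
      else acc
termination_by pvMeas stack
decreasing_by
  · simp only [pvMeas, List.map_cons, List.sum_cons, pvFrameW]
    have : 1 ≤ 2 ^ rem.toNat := Nat.one_le_two_pow
    omega
  · rename_i hrem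
    simp only [pvMeas, List.map_append, List.sum_append, List.map_cons, List.sum_cons, pvFrameW,
      List.map_map]
    have hlt : ((PySem.List.pyRange min_k (min (rem + 1) (n - total) + 1) 2).map
        (pvFrameW ∘ fun k => (rem - (k - 1), k, total + k, parts ++ [k]))).sum < 2 ^ rem.toNat := by
      by_cases hpos : 0 < rem
      · have hmem : ∀ k ∈ PySem.List.pyRange min_k (min (rem + 1) (n - total) + 1) 2,
            min_k ≤ k ∧ k < min (rem + 1) (n - total) + 1 := by
          intro k hk
          have := (PySem.List.mem_pyRange_iff_of_pos (by norm_num : (0:Int) < 2) k).mp hk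
          exact ⟨this.1, this.2.1⟩
        have hcomp : ((PySem.List.pyRange min_k (min (rem + 1) (n - total) + 1) 2).map
            (pvFrameW ∘ fun k => (rem - (k - 1), k, total + k, parts ++ [k]))) =
            (((PySem.List.pyRange min_k (min (rem + 1) (n - total) + 1) 2).map
              (fun k => (rem - (k - 1)).toNat)).map (fun e => 2 ^ e)) := by
          simp [pvFrameW, Function.comp]
        rw [hcomp]
        apply pv_sum_two_pow_lt
        · apply List.Nodup.map_on _ (pv_nodup_pyRange_two _ _)
          intro x hx y hy hxy
          have hx' := hmem x hx; have hy' := hmem y hy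
          omega
        · intro e he
          simp only [List.mem_map] at he
          obtain ⟨k, hk, rfl⟩ := he
          have h2k := h k hk
          have hb := hmem k hk
          omega
      · have : PySem.List.pyRange min_k (min (rem + 1) (n - total) + 1) 2 = [] := by
          rw [List.eq_nil_iff_forall_not_mem]
          intro k hk
          have h2k := h k hk
          have := (PySem.List.mem_pyRange_iff_of_pos (by norm_num : (0:Int) < 2) k).mp hk
          omega
        rw [this]; simpa using Nat.one_le_two_pow
    omega

def cycle_types_by_S_alt (n : Int) : List (Int × List (List Int)) :=
  ((PySem.List.pyRange 2 n 2).foldl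
    (fun (g : PySem.Dict Int (List (List Int))) S =>
      let types := ctLoop n [(S, 3, 0, ([] : List Int))] []
      if types ≠ [] then g.insert S types else g)
    PySem.Dict.empty).items

-- ===== PRECONDITION & SPEC =====
def Spec_cycle_types_by_S (n : Int) (out : List (Int × List (List Int))) : Prop := out = cycle_types_by_S_alt n
instance (n : Int) (out : List (Int × List (List Int))) : Decidable (Spec_cycle_types_by_S n out) := by unfold Spec_cycle_types_by_S; infer_instance

-- ===== CLAIM (what is proved, stated in full; the proofs are below) =====
def Claim_equal_cycle_types_by_S : Prop := ∀ (n : Int), Dom_cycle_types_by_S n → Spec_cycle_types_by_S n (cycle_types_by_S n)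

-- ===== LEMMAS AND PROOFS =====

-- Python's sorted(xs, reverse=True) of a nondecreasing list is its reversal.
theorem pv_sorted_rev_eq_reverse (cur : List Int) (hpw : cur.Pairwise (· ≤ ·)) :
    PySem.List.sorted cur (fun x => x) true = cur.reverse := by
  apply List.Perm.eq_of_pairwise (le := fun a b : Int => b ≤ a)
  · exact fun a b _ _ h1 h2 => le_antisymm h2 h1
  · exact PySem.List.sorted_pairwise_rev cur (fun x => x)
  · exact (List.pairwise_reverse).mpr hpw
  · exact (PySem.List.sorted_perm cur (fun x => x) true).trans cur.reverse_perm.symm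
theorem pv_main (n : Int) : ∀ (fuel : Nat) (S mk total : Int) (cur : List Int)
    (rest : List (Int × Int × Int × List Int)) (acc : List (List Int)),
    S.toNat < fuel → 3 ≤ mk → total = cur.sum → cur.Pairwise (· ≤ ·) → (∀ x ∈ cur, x ≤ mk) →
    ctLoop n ((S, mk, total, cur) :: rest) acc = ctLoop n rest (findTypes fuel S mk n cur acc) := by
  intro fuel
  induction fuel with
  | zero => intro S mk total cur rest acc hf; omega
  | succ f ih =>
    intro S mk total cur rest acc hf hmk htot hpw hle
    subst htot
    by_cases h0 : S = 0
    · subst h0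
      rw [ctLoop, findTypes]
      simp [pv_sorted_rev_eq_reverse cur hpw]
    · have hg : ∀ k ∈ PySem.List.pyRange mk (min (S + 1) (n - cur.sum) + 1) 2, 2 ≤ k := by
        intro k hk
        have := (PySem.List.mem_pyRange_iff_of_pos (by norm_num : (0:Int) < 2) k).mp hk
        omega
      rw [ctLoop]
      rw [if_neg h0, dif_pos hg]
      by_cases h2 : S < 2
      · have hnil : PySem.List.pyRange mk (min (S + 1) (n - cur.sum) + 1) 2 = [] := by
          rw [List.eq_nil_iff_forall_not_mem]
          intro k hk
          have := (PySem.List.mem_pyRange_iff_of_pos (by norm_num : (0:Int) < 2) k).mp hk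
          omega
        rw [findTypes, if_neg h0, if_pos h2, hnil]
        simp
      · rw [findTypes, if_neg h0, if_neg h2]
        have hI : ∀ (ks0 : List Int),
            (∀ k ∈ ks0, mk ≤ k ∧ k - 1 ≤ S ∧ cur.sum + k ≤ n) →
            ∀ (rest' : List (Int × Int × Int × List Int)) (acc' : List (List Int)),
            ctLoop n ((ks0.map (fun k => (S - (k - 1), k, cur.sum + k, cur ++ [k]))) ++ rest') acc' =
            ctLoop n rest' (ks0.foldl
              (fun res k =>
                if k - 1 ≤ S then
                  if cur.sum + k ≤ n then
                    findTypes f (S - (k - 1)) k n (cur ++ [k]) res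
                  else res
                else res) acc') := by
          intro ks0
          induction ks0 with
          | nil => intro _ rest' acc'; simp
          | cons k ks0' ihk =>
            intro hks rest' acc'
            have hk := hks k (List.mem_cons_self)
            have hk3 : 3 ≤ k := le_trans hmk hk.1
            rw [List.map_cons, List.cons_append, List.foldl_cons]
            rw [if_pos hk.2.1, if_pos hk.2.2]
            rw [ih (S - (k - 1)) k (cur.sum + k) (cur ++ [k]) _ acc'
              (by omega) (by omega)
              (by simp)
              (by rw [List.pairwise_append]; exact ⟨hpw, List.pairwise_singleton _ _,
                fun x hx y hy => by simp at hy; subst hy; exact le_trans (hle x hx) hk.1⟩)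
              (by intro x hx; rcases List.mem_append.mp hx with hx | hx
                  · exact le_trans (hle x hx) hk.1
                  · simp at hx; omega)]
            exact ihk (fun k' hk' => hks k' (List.mem_cons_of_mem _ hk')) rest' _
        exact hI _ (by
          intro k hk
          have := (PySem.List.mem_pyRange_iff_of_pos (by norm_num : (0:Int) < 2) k).mp hk
          exact ⟨this.1, by omega, by omega⟩) rest acc

theorem pv_single (n S : Int) :
    ctLoop n [(S, 3, 0, ([] : List Int))] [] = findTypes (S.toNat + 1) S 3 n [] [] := by
  rw [pv_main n (S.toNat + 1) S 3 0 [] [] [] (by omega) (by omega) (by simp) (by simp) (by simp)]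
  rw [ctLoop]

-- ===== VERDICT (by name: the statement is the Claim_ definition above) =====
theorem cycle_types_by_S_spec : Claim_equal_cycle_types_by_S := by
  unfold Claim_equal_cycle_types_by_S Spec_cycle_types_by_S
  intro n _
  unfold cycle_types_by_S cycle_types_by_S_alt
  have hrng : n - 1 + 1 = n := by omega
  rw [hrng]
  congr 1
  apply PySem.List.foldl_congr_mem
  intro acc S _
  rw [pv_single]
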